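-- pv_equiv track=rewrite | github.com/pypi-data/pypi-mirror-334 | packages/mapFolding/mapfolding-0.8.0.tar.gz/mapfolding-0.8.0/mapFolding/reference/flattened.py | validateListDimensions
-- ===== SOURCE A (Python) =====
-- from typing import List, Any, Final, Optional, Union, Sequence, Tuple, Type, TypedDict
--
-- def parseDimensions(dimensions: Sequence[int], parameterName: str = 'unnamed parameter') -> List[int]:
-- 	# listValidated = intInnit(dimensions, parameterName)
-- 	listNOTValidated = dimensions if isinstance(dimensions, (list, tuple)) else list(dimensions)
-- 	listNonNegative = []
-- 	for dimension in listNOTValidated: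
-- 		if dimension < 0:
-- 			raise ValueError(f"Dimension {dimension} must be non-negative")
-- 		listNonNegative.append(dimension)
-- 	if not listNonNegative:
-- 		raise ValueError("At least one dimension must be non-negative")
-- 	return listNonNegative
--
-- def validateListDimensions(listDimensions: Sequence[int]) -> List[int]:
-- 	if not listDimensions:
-- 		raise ValueError(f"listDimensions is a required parameter.")
-- 	listNonNegative = parseDimensions(listDimensions, 'listDimensions')
-- 	dimensionsValid = [dimension for dimension in listNonNegative if dimension > 0]
-- 	if len(dimensionsValid) < 2:
-- 		raise NotImplementedError(f"This function requires listDimensions, {listDimensions}, to have at least two dimensions greater than 0. You may want to look at https://oeis.org/.")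
-- 	return sorted(dimensionsValid)
-- ===== SOURCE B (Python) =====
-- def validateListDimensions(listDimensions):
--     if not listDimensions:
--         raise ValueError("listDimensions is a required parameter.")
--     sortedPositive = []
--     for dimension in listDimensions:
--         if dimension < 0:
--             raise ValueError(f"Dimension {dimension} must be non-negative")
--         if dimension > 0:
--             i = 0
--             while i < len(sortedPositive) and sortedPositive[i] <= dimension:
--                 i += 1
--             sortedPositive.insert(i, dimension)
--     if len(sortedPositive) < 2:
--         raise NotImplementedError(f"This function requires listDimensions, {listDimensions}, to have at least two dimensions greater than 0. You may want to look at https://oeis.org/.")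
--     return sortedPositive
-- ===== Notes on version B (the rewrite author's own statement) =====
-- stated objective: simpler
-- what changed: B is one self-contained function doing a single fused pass: it validates each dimension and inserts positive ones directly into their sorted position (incremental insertion sort), instead of A's helper call, copy loop, filter comprehension and final sorted().
import Mathlib
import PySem

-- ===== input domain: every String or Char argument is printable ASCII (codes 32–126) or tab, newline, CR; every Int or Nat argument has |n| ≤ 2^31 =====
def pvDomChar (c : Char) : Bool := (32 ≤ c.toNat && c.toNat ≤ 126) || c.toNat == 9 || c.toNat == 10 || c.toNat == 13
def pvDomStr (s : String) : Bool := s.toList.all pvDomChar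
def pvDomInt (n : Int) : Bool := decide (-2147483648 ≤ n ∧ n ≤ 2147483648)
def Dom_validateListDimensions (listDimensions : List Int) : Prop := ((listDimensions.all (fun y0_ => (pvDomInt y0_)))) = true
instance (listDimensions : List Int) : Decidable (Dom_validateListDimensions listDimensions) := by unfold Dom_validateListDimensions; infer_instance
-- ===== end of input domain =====

-- B fuses A's copy loop, positive-filter comprehension and final sorted() into one
-- pass that inserts each positive dimension into its sorted position; objective: simpler.

-- ===== PORT A =====
-- parseDimensions: the copy loop (the negative-raise branch is excluded by Pre_)
def parseDimensionsA (dimensions : List Int) : List Int :=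
  dimensions.foldl (fun acc d => acc ++ [d]) []

def validateListDimensions (listDimensions : List Int) : List Int :=
  let listNonNegative := parseDimensionsA listDimensions
  let dimensionsValid := listNonNegative.filter (fun d => decide (0 < d))
  PySem.List.sorted dimensionsValid (fun x => x) false

-- ===== PORT B =====
-- insert dimension after every element ≤ it (Source B's while-loop + insert)
def validateListDimensions_alt (listDimensions : List Int) : List Int :=
  listDimensions.foldl
    (fun acc d =>
      if 0 < d then PySem.List.insertBy (fun a b => decide (a < b)) d acc else acc) []

-- ===== PRECONDITION & SPEC =====
-- Pre_ excludes exactly the inputs where A raises: the empty list (ValueError),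
-- any negative dimension (ValueError), fewer than two positive dimensions (NotImplementedError).
def Pre_validateListDimensions (listDimensions : List Int) : Prop :=
  listDimensions ≠ [] ∧ (∀ d ∈ listDimensions, 0 ≤ d) ∧
    2 ≤ (listDimensions.filter (fun d => decide (0 < d))).length
instance (listDimensions : List Int) : Decidable (Pre_validateListDimensions listDimensions) := by
  unfold Pre_validateListDimensions; infer_instance
def pvWitness_validateListDimensions : List Int := [3, 0, 2]

def Spec_validateListDimensions (listDimensions : List Int) (out : List Int) : Prop := out = validateListDimensions_alt listDimensions
instance (listDimensions : List Int) (out : List Int) : Decidable (Spec_validateListDimensions listDimensions out) := by unfold Spec_validateListDimensions; infer_instance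

-- ===== CLAIM (what is proved, stated in full; the proofs are below) =====
def Claim_equal_validateListDimensions : Prop := ∀ (listDimensions : List Int), Dom_validateListDimensions listDimensions → Pre_validateListDimensions listDimensions → Spec_validateListDimensions listDimensions (validateListDimensions listDimensions)

-- ===== LEMMAS AND PROOFS =====
theorem foldl_append_id (l acc : List Int) :
    l.foldl (fun acc d => acc ++ [d]) acc = acc ++ l := by
  induction l generalizing acc with
  | nil => simp
  | cons h t ih => simp [List.foldl, ih]

-- ===== VERDICT (by name: the statement is the Claim_ definition above) =====
theorem validateListDimensions_spec : Claim_equal_validateListDimensions := by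
  intro l _ _
  unfold Spec_validateListDimensions validateListDimensions validateListDimensions_alt parseDimensionsA
  rw [foldl_append_id, List.nil_append,
    PySem.List.sorted_eq_foldl_insertBy, List.foldl_filter]
  simp
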